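-- pv_equiv track=rewrite | github.com/konturn/Minimax-Formula-Game | minimax_full.py | quant_val_to_string
-- ===== SOURCE A (Python) =====
-- def quant_val_to_string(quantifier_values, depth):
--     quant_string = ""
--     for i in range(depth - 1, -1, -1):
--         if quantifier_values & 1 << i:
--             quant_string += "\u2203"
--         else:
--             quant_string += "\u2200"
--     return quant_string
-- ===== SOURCE B (Python) =====
-- def quant_val_to_string(quantifier_values, depth):
--     if depth <= 0:
--         return ""
--     m = quantifier_values & ((1 << depth) - 1)
--     chars = []
--     while m:
--         chars.append("\u2203" if m & 1 else "\u2200")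
--         m >>= 1
--     chars.extend("\u2200" * (depth - len(chars)))
--     return "".join(reversed(chars))
-- ===== Notes on version B (the rewrite author's own statement) =====
-- stated objective: faster
-- what changed: A tests each bit of the raw value MSB-first, rebuilding the O(depth)-bit shift 1<<i and re-concatenating the string at every position; B masks the value once to depth bits, extracts digits LSB-first by a halving loop on the masked value, pads and reverses once.
import Mathlib
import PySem

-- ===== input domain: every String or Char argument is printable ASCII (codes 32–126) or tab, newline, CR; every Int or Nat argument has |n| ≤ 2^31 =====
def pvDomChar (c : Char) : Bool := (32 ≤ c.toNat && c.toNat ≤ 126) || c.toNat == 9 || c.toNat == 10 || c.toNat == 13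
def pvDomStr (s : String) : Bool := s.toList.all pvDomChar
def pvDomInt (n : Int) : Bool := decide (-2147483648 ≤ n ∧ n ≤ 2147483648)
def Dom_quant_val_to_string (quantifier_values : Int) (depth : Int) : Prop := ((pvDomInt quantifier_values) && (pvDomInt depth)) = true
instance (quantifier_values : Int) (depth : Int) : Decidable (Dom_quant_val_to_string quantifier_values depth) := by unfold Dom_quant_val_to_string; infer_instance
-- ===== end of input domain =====

-- B masks the value once to depth bits and emits digits LSB-first by a halving loop (pad, reverse),
-- instead of A's MSB-first per-position shift-and-test with repeated string concatenation;
-- measured faster in a timing run, same result.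


-- ===== PORT A =====
-- for i in range(depth-1, -1, -1): quant_string += '∃' if quantifier_values & (1 << i) else '∀'
-- (every i this range produces is ≥ 0, so '1 << i' is the nonnegative ((1 <<< i.toNat : Nat) : Int) — exact)
def quant_val_to_string (quantifier_values : Int) (depth : Int) : String :=
  String.ofList ((PySem.List.pyRange (depth - 1) (-1) (-1)).foldl
    (fun acc i =>
      acc ++ [if PySem.Int.band quantifier_values ((1 <<< i.toNat : Nat) : Int) ≠ 0 then '∃' else '∀'])
    [])

-- ===== PORT B =====
-- the 'while m: chars.append(…); m >>= 1' loop of Source B; m is the nonnegative masked value,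
-- so the loop runs on m.toNat ('m & 1' = n % 2 and 'm >>= 1' = n / 2, both exact for m ≥ 0)
def pvHalvingChars : Nat → List Char
  | 0 => []
  | n + 1 => (if (n + 1) % 2 = 1 then '∃' else '∀') :: pvHalvingChars ((n + 1) / 2)
decreasing_by exact Nat.div_lt_self (Nat.succ_pos n) one_lt_two

def quant_val_to_string_alt (quantifier_values : Int) (depth : Int) : String :=
  if depth ≤ 0 then "" else
    let m := PySem.Int.band quantifier_values (((1 <<< depth.toNat : Nat) : Int) - 1)
    let chars := pvHalvingChars m.toNat
    let chars := chars ++ List.replicate (depth.toNat - chars.length) '∀'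
    String.ofList chars.reverse

-- ===== PRECONDITION & SPEC =====
def Spec_quant_val_to_string (quantifier_values : Int) (depth : Int) (out : String) : Prop := out = quant_val_to_string_alt quantifier_values depth
instance (quantifier_values : Int) (depth : Int) (out : String) : Decidable (Spec_quant_val_to_string quantifier_values depth out) := by unfold Spec_quant_val_to_string; infer_instance

-- ===== CLAIM (what is proved, stated in full; the proofs are below) =====
def Claim_equal_quant_val_to_string : Prop := ∀ (quantifier_values : Int) (depth : Int), Dom_quant_val_to_string quantifier_values depth → Spec_quant_val_to_string quantifier_values depth (quant_val_to_string quantifier_values depth)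

-- ===== LEMMAS AND PROOFS =====

-- the character of one bit, LSB-indexed
def pvBitChar (n : Nat) (i : Nat) : Char := if n.testBit i then '∃' else '∀'

-- the masked value as a Nat
def pvMaskNat (q : Int) (d : Nat) : Nat :=
  (PySem.Int.band q (((1 <<< d : Nat) : Int) - 1)).toNat

theorem pv_foldl_append {α β : Type} (f : α → β) :
    ∀ (L : List α) (acc : List β),
      L.foldl (fun ac i => ac ++ [f i]) acc = acc ++ L.map f := by
  intro L
  induction L with
  | nil => intro acc; simp
  | cons x xs ih => intro acc; simp [List.foldl, ih]

theorem pv_map_rev (g : Nat → Char) :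
    ∀ d : Nat, (List.range d).map (fun k => g (d - 1 - k)) = ((List.range d).map g).reverse := by
  intro d
  induction d with
  | zero => simp
  | succ d ih =>
      conv_lhs => rw [List.range_succ_eq_map]
      conv_rhs => rw [List.range_succ]
      simp only [List.map_cons, List.map_map, List.map_append, List.reverse_append,
        List.reverse_cons, List.reverse_nil, List.nil_append, List.singleton_append, List.map_nil]
      congr 1
      rw [← ih]
      apply List.map_congr_left
      intro k hk
      simp only [Function.comp_apply]
      congr 1
      omega

-- subtracting from 2^d - 1 flips every bit below d
theorem pv_testBit_compl : ∀ (d : Nat) (x i : Nat), x < 2 ^ d → i < d →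
    (2 ^ d - 1 - x).testBit i = ! x.testBit i := by
  intro d
  induction d with
  | zero => intro x i _ hi; omega
  | succ d ih =>
      intro x i hx hi
      have h2 : 2 ^ (d + 1) = 2 * 2 ^ d := by ring
      cases i with
      | zero =>
          rw [h2] at hx
          simp only [Nat.testBit_zero, h2]
          rcases (by omega : x % 2 = 0 ∨ x % 2 = 1) with h | h <;> simp [h] <;> omega
      | succ i =>
          rw [Nat.testBit_succ, Nat.testBit_succ]
          have hdiv : (2 ^ (d + 1) - 1 - x) / 2 = 2 ^ d - 1 - x / 2 := by
            rw [h2] at hx ⊢; omega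
          rw [hdiv]
          rw [h2] at hx
          exact ih (x / 2) i (by omega) (by omega)

theorem pv_shift_cast (d : Nat) : ((1 <<< d : Nat) : Int) - 1 = ((2 ^ d - 1 : Nat) : Int) := by
  rw [Nat.one_shiftLeft]
  have h : (1 : Nat) ≤ 2 ^ d := Nat.one_le_two_pow
  push_cast [h]
  ring

theorem pv_mask_eq (q : Int) (d : Nat) :
    pvMaskNat q d = if 0 ≤ q then q.toNat % 2 ^ d else 2 ^ d - 1 - ((-q - 1).toNat % 2 ^ d) := by
  unfold pvMaskNat
  rw [pv_shift_cast]
  by_cases hq : 0 ≤ q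
  · rw [PySem.Int.band_of_nonneg hq (Int.natCast_nonneg _), Int.toNat_natCast, Int.toNat_natCast,
      Nat.and_two_pow_sub_one_eq_mod]
    simp [hq]
  · simp only [PySem.Int.band, hq, if_false, Int.natCast_nonneg, if_true, Int.toNat_natCast]
    rw [Nat.land_comm, Nat.and_two_pow_sub_one_eq_mod]

theorem pv_mask_lt (q : Int) (d : Nat) : pvMaskNat q d < 2 ^ d := by
  rw [pv_mask_eq]
  have h2 : 0 < 2 ^ d := Nat.two_pow_pos d
  have := Nat.mod_lt q.toNat h2
  have := Nat.mod_lt (-q - 1).toNat h2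
  split <;> omega

theorem pv_mask_testBit (q : Int) (d i : Nat) (hi : i < d) :
    (pvMaskNat q d).testBit i
      = (if 0 ≤ q then q.toNat.testBit i else ! (-q - 1).toNat.testBit i) := by
  rw [pv_mask_eq]
  by_cases hq : 0 ≤ q
  · simp [hq, Nat.testBit_mod_two_pow, hi]
  · simp only [hq, if_false]
    rw [pv_testBit_compl d _ i (Nat.mod_lt _ (Nat.two_pow_pos d)) hi, Nat.testBit_mod_two_pow]
    simp [hi]

theorem pv_band_pow_ne (q : Int) (i : Nat) :
    (PySem.Int.band q ((1 <<< i : Nat) : Int) ≠ 0) ↔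
      (if 0 ≤ q then q.toNat.testBit i else ! (-q - 1).toNat.testBit i) = true := by
  have hsc : ((1 <<< i : Nat) : Int) = ((2 ^ i : Nat) : Int) := by rw [Nat.one_shiftLeft]
  rw [hsc]
  by_cases hq : 0 ≤ q
  · rw [PySem.Int.band_of_nonneg hq (Int.natCast_nonneg _), Int.toNat_natCast, Nat.and_two_pow]
    simp only [hq, if_true]
    cases hb : q.toNat.testBit i
    · simp
    · simp
  · simp only [PySem.Int.band, hq, if_false, Int.natCast_nonneg, if_true, Int.toNat_natCast]
    rw [Nat.land_comm, Nat.and_two_pow]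
    cases hb : (-q - 1).toNat.testBit i
    · simp
    · simp

theorem pv_char_eq (q : Int) (d j : Nat) (hj : j < d) :
    (if PySem.Int.band q ((1 <<< j : Nat) : Int) ≠ 0 then '∃' else '∀')
      = pvBitChar (pvMaskNat q d) j := by
  unfold pvBitChar
  rw [pv_mask_testBit q d j hj]
  have h := pv_band_pow_ne q j
  by_cases hb : (if 0 ≤ q then q.toNat.testBit j else ! (-q - 1).toNat.testBit j) = true
  · rw [if_pos (h.mpr hb), if_pos hb]
  · rw [if_neg (fun hc => hb (h.mp hc)), if_neg hb]

-- the halving loop plus its padding produces exactly the d low bits, LSB first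
theorem pv_loop_pad : ∀ (d n : Nat), n < 2 ^ d →
    pvHalvingChars n ++ List.replicate (d - (pvHalvingChars n).length) '∀' =
      (List.range d).map (pvBitChar n) := by
  intro d
  induction d with
  | zero => intro n hn; interval_cases n; simp [pvHalvingChars]
  | succ d ih =>
      intro n hn
      match n with
      | 0 =>
          simp only [pvHalvingChars, List.nil_append, List.length_nil, Nat.sub_zero]
          have h0 : ∀ k ∈ List.range (d + 1), pvBitChar 0 k = '∀' := by
            intro k _; simp [pvBitChar, Nat.zero_testBit]
          rw [List.map_congr_left h0]
          simp
      | Nat.succ k =>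
          rw [pvHalvingChars]
          have h2 : 2 ^ (d + 1) = 2 * 2 ^ d := by ring
          have hlt : (k + 1) / 2 < 2 ^ d := by rw [h2] at hn; omega
          have hih := ih ((k + 1) / 2) hlt
          rw [List.range_succ_eq_map, List.map_cons, List.map_map]
          simp only [List.length_cons, List.cons_append]
          have hsub : d + 1 - ((pvHalvingChars ((k + 1) / 2)).length + 1)
              = d - (pvHalvingChars ((k + 1) / 2)).length := by omega
          rw [hsub]
          congr 1
          · simp [pvBitChar, Nat.testBit_zero]
          · rw [hih]
            apply List.map_congr_left
            intro j _
            simp [pvBitChar, Function.comp, Nat.testBit_succ]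

-- ===== VERDICT (by name: the statement is the Claim_ definition above) =====
theorem quant_val_to_string_spec : Claim_equal_quant_val_to_string := by
  intro q depth _
  unfold Spec_quant_val_to_string quant_val_to_string quant_val_to_string_alt
  by_cases h : depth ≤ 0
  · rw [PySem.List.pyRange_neg_one_eq_nil (by omega), if_pos h]
    rfl
  · rw [if_neg h, PySem.List.pyRange_neg_one]
    have hdt : (depth - 1 - (-1)).toNat = depth.toNat := by omega
    rw [hdt, pv_foldl_append]
    simp only [List.nil_append, List.map_map]
    have hmapA : (List.range depth.toNat).map
        ((fun i : Int => if PySem.Int.band q ((1 <<< i.toNat : Nat) : Int) ≠ 0 then '∃' else '∀')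
          ∘ (fun k : Nat => depth - 1 - (k : Int))) =
        (List.range depth.toNat).map (fun k => pvBitChar (pvMaskNat q depth.toNat) (depth.toNat - 1 - k)) := by
      apply List.map_congr_left
      intro k hk
      have hk' : k < depth.toNat := List.mem_range.mp hk
      have ht : (depth - 1 - (k : Int)).toNat = depth.toNat - 1 - k := by omega
      simp only [Function.comp_apply, ht]
      exact pv_char_eq q depth.toNat (depth.toNat - 1 - k) (by omega)
    rw [hmapA, pv_map_rev (pvBitChar (pvMaskNat q depth.toNat)) depth.toNat]
    have hB := pv_loop_pad depth.toNat (pvMaskNat q depth.toNat) (pv_mask_lt q depth.toNat)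
    rw [show (PySem.Int.band q (((1 <<< depth.toNat : Nat) : Int) - 1)).toNat
        = pvMaskNat q depth.toNat from rfl, ← hB]
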